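-- pv_equiv track=rewrite | github.com/MassiveZappy/mangolo | fixed_mangolo.py | _is_balanced_array
-- ===== SOURCE A (Python) =====
-- def _is_balanced_array(text):
--     """Check if brackets are balanced in array text, ignoring quoted content."""
--     stack = []
--     in_quotes = False
--     quote_char = None
--     escaped = False
--
--     for char in text:
--         if escaped:
--             escaped = False
--             continue
--
--         if char == '\\':
--             escaped = True
--             continue
--
--         if char in ('"', "'") and (not in_quotes or quote_char == char):
--             if in_quotes and quote_char == char:
--                 in_quotes = False
--                 quote_char = None
--             else:
--                 in_quotes = True
--                 quote_char = char
--             continue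
--
--         if in_quotes:
--             continue
--
--         if char == '[':
--             stack.append('[')
--         elif char == ']':
--             if not stack or stack[-1] != '[':
--                 return False
--             stack.pop()
--
--     return len(stack) == 0
-- ===== SOURCE B (Python) =====
-- def _is_balanced_array(text):
--     """Two-pass: collect the unquoted, unescaped brackets, then balance them with a counter."""
--     brackets = []
--     in_quotes = False
--     quote_char = None
--     escaped = False
--     for char in text:
--         if escaped:
--             escaped = False
--             continue
--         if char == '\\':
--             escaped = True
--             continue
--         if char in ('"', "'") and (not in_quotes or quote_char == char):
--             if in_quotes:
--                 in_quotes = False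
--                 quote_char = None
--             else:
--                 in_quotes = True
--                 quote_char = char
--             continue
--         if not in_quotes and char in ('[', ']'):
--             brackets.append(char)
--     depth = 0
--     for b in brackets:
--         if b == '[':
--             depth += 1
--         else:
--             if depth == 0:
--                 return False
--             depth -= 1
--     return depth == 0
-- ===== Notes on version B (the rewrite author's own statement) =====
-- stated objective: alternative
-- what changed: A's single fused loop (quote/escape state machine balancing a stack inline with early return) is split into a filter pass that only collects the unquoted unescaped brackets, followed by a separate counter-based balance scan over that list.
import Mathlib
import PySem

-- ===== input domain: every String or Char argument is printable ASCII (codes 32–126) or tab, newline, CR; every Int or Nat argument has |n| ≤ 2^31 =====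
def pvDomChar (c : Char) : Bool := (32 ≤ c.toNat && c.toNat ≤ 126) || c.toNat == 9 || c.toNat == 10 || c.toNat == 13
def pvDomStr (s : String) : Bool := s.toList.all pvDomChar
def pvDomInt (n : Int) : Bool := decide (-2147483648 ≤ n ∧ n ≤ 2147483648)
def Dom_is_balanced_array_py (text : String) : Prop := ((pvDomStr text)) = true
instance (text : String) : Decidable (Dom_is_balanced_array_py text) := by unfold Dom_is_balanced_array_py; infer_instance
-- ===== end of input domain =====

-- B replaces A's fused stack-balancing state machine by a bracket-filtering pass plus a
-- separate counter-based balance scan (objective: alternative decomposition, same cost).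

-- ===== PORT A =====
-- A's loop; the Python list `stack` (append/pop at the end) is represented head-first:
-- push = cons, stack[-1] = head, pop = tail.
def pvALoop : List Char → List Char → Bool → Option Char → Bool → Bool
  | [], stack, _, _, _ => stack.length == 0
  | c :: rest, stack, in_quotes, quote_char, escaped =>
    if escaped then pvALoop rest stack in_quotes quote_char false
    else if c == '\\' then pvALoop rest stack in_quotes quote_char true
    else if (c == '"' || c == '\'') && (!in_quotes || quote_char == some c) then
      if in_quotes && quote_char == some c then pvALoop rest stack false none escaped
      else pvALoop rest stack true (some c) escaped
    else if in_quotes then pvALoop rest stack in_quotes quote_char escaped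
    else if c == '[' then pvALoop rest ('[' :: stack) in_quotes quote_char escaped
    else if c == ']' then
      match stack with
      | [] => false
      | top :: stack' => if top != '[' then false else pvALoop rest stack' in_quotes quote_char escaped
    else pvALoop rest stack in_quotes quote_char escaped

def is_balanced_array_py (text : String) : Bool :=
  pvALoop text.toList [] false none false

-- ===== PORT B =====
-- first pass: emit the brackets that occur outside quotes and are not escaped
def pvBFilter : List Char → Bool → Option Char → Bool → List Char
  | [], _, _, _ => []
  | c :: rest, in_quotes, quote_char, escaped =>
    if escaped then pvBFilter rest in_quotes quote_char false
    else if c == '\\' then pvBFilter rest in_quotes quote_char true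
    else if (c == '"' || c == '\'') && (!in_quotes || quote_char == some c) then
      if in_quotes then pvBFilter rest false none escaped
      else pvBFilter rest true (some c) escaped
    else if !in_quotes && (c == '[' || c == ']') then c :: pvBFilter rest in_quotes quote_char escaped
    else pvBFilter rest in_quotes quote_char escaped

-- second pass: integer depth counter over the collected brackets
def pvBScan : List Char → Int → Bool
  | [], depth => depth == 0
  | b :: rest, depth =>
    if b == '[' then pvBScan rest (depth + 1)
    else if depth == 0 then false
    else pvBScan rest (depth - 1)

def is_balanced_array_py_alt (text : String) : Bool :=
  pvBScan (pvBFilter text.toList false none false) 0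

-- ===== PRECONDITION & SPEC =====
def Spec_is_balanced_array_py (text : String) (out : Bool) : Prop := out = is_balanced_array_py_alt text
instance (text : String) (out : Bool) : Decidable (Spec_is_balanced_array_py text out) := by unfold Spec_is_balanced_array_py; infer_instance

-- ===== CLAIM (what is proved, stated in full; the proofs are below) =====
def Claim_equal_is_balanced_array_py : Prop := ∀ (text : String), Dom_is_balanced_array_py text → Spec_is_balanced_array_py text (is_balanced_array_py text)

-- ===== LEMMAS AND PROOFS =====

-- A's stack holds only '[' (the invariant), and its length is B's depth counter.
lemma pvAB_loop (l : List Char) : ∀ (stack : List Char) (inq : Bool) (qc : Option Char) (esc : Bool),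
    (∀ x ∈ stack, x = '[') →
    pvALoop l stack inq qc esc = pvBScan (pvBFilter l inq qc esc) (stack.length : Int) := by
  induction l with
  | nil =>
    intro stack inq qc esc _
    simp [pvALoop, pvBFilter, pvBScan]
  | cons c rest ih =>
    intro stack inq qc esc hstack
    cases esc with
    | true => simp [pvALoop, pvBFilter, ih _ _ _ _ hstack]
    | false =>
      by_cases hbs : c = '\\'
      · simp [pvALoop, pvBFilter, hbs, ih _ _ _ _ hstack]
      · by_cases hquote : c = '"' ∨ c = '\''
        · cases inq with
          | false =>
            rcases hquote with h | h <;> subst h <;>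
              simp [pvALoop, pvBFilter, ih _ _ _ _ hstack]
          | true =>
            by_cases hqc : qc = some c
            · rcases hquote with h | h <;> subst h <;>
                simp [pvALoop, pvBFilter, hqc, ih _ _ _ _ hstack]
            · rcases hquote with h | h <;> subst h <;>
                simp [pvALoop, pvBFilter, hqc, ih _ _ _ _ hstack]
        · push Not at hquote
          cases inq with
          | true => simp [pvALoop, pvBFilter, hbs, hquote.1, hquote.2, ih _ _ _ _ hstack]
          | false =>
            by_cases hob : c = '['
            · have hst' : ∀ x ∈ '[' :: stack, x = '[' := by
                intro x hx
                rcases List.mem_cons.mp hx with h | h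
                · exact h
                · exact hstack x h
              subst hob
              simp [pvALoop, pvBFilter, pvBScan, ih _ _ _ _ hst']
            · by_cases hcb : c = ']'
              · subst hcb
                cases stack with
                | nil => simp [pvALoop, pvBFilter, pvBScan]
                | cons top stack' =>
                  have htop : top = '[' := hstack top (by simp)
                  have hst' : ∀ x ∈ stack', x = '[' := fun x hx => hstack x (by simp [hx])
                  have hne : ((stack'.length : Int) + 1) ≠ 0 := by positivity
                  have heq : ((stack'.length : Int) + 1) - 1 = (stack'.length : Int) := by ring
                  simp [pvALoop, pvBFilter, pvBScan, htop, hne, heq, ih _ _ _ _ hst']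
              · simp [pvALoop, pvBFilter, hbs, hquote.1, hquote.2, hob, hcb, ih _ _ _ _ hstack]

-- ===== VERDICT (by name: the statement is the Claim_ definition above) =====
theorem is_balanced_array_py_spec : Claim_equal_is_balanced_array_py := by
  intro text _
  unfold Spec_is_balanced_array_py is_balanced_array_py is_balanced_array_py_alt
  simpa using pvAB_loop text.toList [] false none false (by simp)
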